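-- pv_equiv track=rewrite | github.com/Kalyan-udd/DSA-data-structures-and-algorithms- | leetcode/division _of_an_array.py | division_of_array
-- ===== SOURCE A (Python) =====
-- def division_of_array(nums):
--     n = len(nums)
--     total_sum = float('inf')
--     if n<=3:
--         return sum(nums)
--     for i in range(1,n-1):
--         for j in range(i+1,n):
--             cost = nums[i]+nums[j]
--             total_sum = min(total_sum,cost)
--     total_sum += nums[0]
--     return total_sum
-- ===== SOURCE B (Python) =====
-- def division_of_array(nums):
--     n = len(nums)
--     if n <= 3:
--         return sum(nums)
--     tail = sorted(nums[1:])
--     return nums[0] + tail[0] + tail[1]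
-- ===== Notes on version B (the rewrite author's own statement) =====
-- stated objective: faster
-- what changed: Replaces the O(n^2) nested scan over all index pairs of the tail with a single sort of nums[1:] followed by taking its two smallest elements, whose sum equals the minimum pairwise sum.
import Mathlib
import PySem

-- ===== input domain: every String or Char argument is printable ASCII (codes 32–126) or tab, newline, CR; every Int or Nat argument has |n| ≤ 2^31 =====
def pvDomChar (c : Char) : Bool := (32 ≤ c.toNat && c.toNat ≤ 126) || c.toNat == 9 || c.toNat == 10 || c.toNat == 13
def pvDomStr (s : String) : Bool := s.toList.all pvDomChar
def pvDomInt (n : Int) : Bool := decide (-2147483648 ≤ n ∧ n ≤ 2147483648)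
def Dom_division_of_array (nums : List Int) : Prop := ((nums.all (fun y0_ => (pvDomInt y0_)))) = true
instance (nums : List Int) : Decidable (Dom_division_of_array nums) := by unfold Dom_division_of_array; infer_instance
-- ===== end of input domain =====

-- B replaces A's O(n^2) nested scan of all tail index pairs by one sort of nums[1:]
-- followed by taking its two smallest elements (objective: faster).

-- ===== PORT A =====
-- total_sum = min(total_sum, cost) starting from float('inf'): Option Int, none = inf (exact:
-- min(inf, c) = c, and inf is never returned since for n > 3 the loop body runs at least once).
def pvMinStep (acc : Option Int) (c : Int) : Option Int :=
  some (match acc with | none => c | some t => min t c)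

def division_of_array (nums : List Int) : Int :=
  let n : Int := nums.length
  if n ≤ 3 then nums.sum
  else
    let total :=
      (PySem.List.pyRange 1 (n - 1) 1).foldl
        (fun acc i =>
          (PySem.List.pyRange (i + 1) n 1).foldl
            (fun acc2 j =>
              pvMinStep acc2 (PySem.List.pyGetD nums i 0 + PySem.List.pyGetD nums j 0)) acc)
        none
    match total with
    | some t => t + PySem.List.pyGetD nums 0 0
    | none => 0  -- unreachable: for n > 3 the nested loop executes at least once

-- ===== PORT B =====
def division_of_array_alt (nums : List Int) : Int :=
  let n : Int := nums.length
  if n ≤ 3 then nums.sum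
  else
    let tail := PySem.List.sorted (PySem.List.slice nums (some 1) none) (fun x => x) false
    PySem.List.pyGetD nums 0 0 + PySem.List.pyGetD tail 0 0 + PySem.List.pyGetD tail 1 0

-- ===== PRECONDITION & SPEC =====
def Spec_division_of_array (nums : List Int) (out : Int) : Prop := out = division_of_array_alt nums
instance (nums : List Int) (out : Int) : Decidable (Spec_division_of_array nums out) := by unfold Spec_division_of_array; infer_instance

-- ===== CLAIM (what is proved, stated in full; the proofs are below) =====
def Claim_equal_division_of_array : Prop := ∀ (nums : List Int), Dom_division_of_array nums → Spec_division_of_array nums (division_of_array nums)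

-- ===== LEMMAS AND PROOFS =====

-- the list of all costs nums[i] + nums[j] scanned by A's nested loop
def pvCosts (nums : List Int) : List Int :=
  (PySem.List.pyRange 1 ((nums.length : Int) - 1) 1).flatMap
    (fun i => (PySem.List.pyRange (i + 1) (nums.length : Int) 1).map
      (fun j => PySem.List.pyGetD nums i 0 + PySem.List.pyGetD nums j 0))

theorem pvFoldl_minStep_some (cs : List Int) : ∀ a : Int, cs.foldl pvMinStep (some a) = some (cs.foldl min a) := by
  induction cs with
  | nil => intro a; rfl
  | cons c cs ih => intro a; simp [List.foldl, pvMinStep, ih]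

theorem pvFoldl_minStep_none (cs : List Int) : cs.foldl pvMinStep none = cs.min? := by
  cases cs with
  | nil => rfl
  | cons c cs => simp [List.foldl, pvMinStep, List.min?, pvFoldl_minStep_some]

theorem pvLoop_eq_min? (nums : List Int) :
    (PySem.List.pyRange 1 ((nums.length : Int) - 1) 1).foldl
      (fun acc i =>
        (PySem.List.pyRange (i + 1) (nums.length : Int) 1).foldl
          (fun acc2 j =>
            pvMinStep acc2 (PySem.List.pyGetD nums i 0 + PySem.List.pyGetD nums j 0)) acc)
      none = (pvCosts nums).min? := by
  rw [← pvFoldl_minStep_none, pvCosts, List.foldl_flatMap]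
  simp [List.foldl_map]

theorem pvMem_costs (nums : List Int) (c : Int) :
    c ∈ pvCosts nums ↔ ∃ i j : Int, 1 ≤ i ∧ i < j ∧ j < (nums.length : Int) ∧
      c = PySem.List.pyGetD nums i 0 + PySem.List.pyGetD nums j 0 := by
  simp only [pvCosts, List.mem_flatMap, List.mem_map, PySem.List.mem_pyRange_one]
  constructor
  · rintro ⟨i, ⟨hi1, hi2⟩, j, ⟨hj1, hj2⟩, rfl⟩
    exact ⟨i, j, hi1, by omega, hj2, rfl⟩
  · rintro ⟨i, j, hi1, hij, hj, rfl⟩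
    exact ⟨i, ⟨hi1, by omega⟩, j, ⟨by omega, hj⟩, rfl⟩

theorem pvPerm_pair_cases {α : Type} (l : List α) (a b : α) (h : l.Perm [a, b]) :
    l = [a, b] ∨ l = [b, a] := by
  have hlen := h.length_eq
  match l, hlen with
  | [x, y], _ =>
    have hx : x = a ∨ x = b := by
      have hm : x ∈ [a, b] := h.mem_iff.mp (by simp)
      simpa using hm
    rcases hx with rfl | rfl
    · left
      have h2 : [y].Perm [b] := (List.perm_cons x).mp h
      have : y = b := by simpa [List.perm_singleton] using h2
      simp [this]
    · right
      have hsw : ([a, x] : List α).Perm [x, a] := List.Perm.swap x a []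
      have h3 : [y].Perm [a] := (List.perm_cons x).mp (h.trans hsw)
      have : y = a := by simpa [List.perm_singleton] using h3
      simp [this]

theorem pvPair_sublist_bound (s0 s1 : Int) (rest : List Int)
    (hp : (s0 :: s1 :: rest).Pairwise (· ≤ ·)) (x y : Int)
    (h : [x, y].Sublist (s0 :: s1 :: rest)) : s0 ≤ x ∧ s1 ≤ y := by
  have hx : x ∈ s0 :: s1 :: rest := h.subset (by simp)
  have hy2 : y ∈ s1 :: rest := by
    cases h with
    | cons _ h' => exact h'.subset (by simp)
    | cons₂ _ h' => exact h'.subset (by simp)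
  rcases List.pairwise_cons.mp hp with ⟨h0, hp1⟩
  rcases List.pairwise_cons.mp hp1 with ⟨h1, _⟩
  constructor
  · rcases List.mem_cons.mp hx with rfl | hx'
    · exact le_refl x
    · exact h0 x hx'
  · rcases List.mem_cons.mp hy2 with rfl | hy'
    · exact le_refl y
    · exact h1 y hy'

-- the math: for nums = a0 :: t with |t| ≥ 3 and sorted t = s0 :: s1 :: rest,
-- the minimum of all pairwise tail costs is s0 + s1
theorem pvMin_costs (a0 : Int) (t : List Int) (s0 s1 : Int) (rest : List Int)
    (hs : PySem.List.sorted t (fun x => x) false = s0 :: s1 :: rest) :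
    (pvCosts (a0 :: t)).min? = some (s0 + s1) := by
  have hperm : (s0 :: s1 :: rest).Perm t := hs ▸ PySem.List.sorted_perm ..
  have hpw : (s0 :: s1 :: rest).Pairwise (· ≤ ·) := by
    have := PySem.List.sorted_pairwise t (fun x => x) (κ := Int)
    rw [hs] at this; simpa using this
  rw [List.min?_eq_some_iff]
  constructor
  · -- s0 + s1 is one of the costs
    have hsub : [s0, s1].Sublist (s0 :: s1 :: rest) := by
      exact List.Sublist.cons₂ s0 (List.Sublist.cons₂ s1 (List.nil_sublist rest))
    have hsp : [s0, s1].Subperm t := hsub.subperm.trans hperm.subperm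
    obtain ⟨l', hl'p, hl's⟩ := hsp
    have hxy : ∃ x y : Int, [x, y].Sublist t ∧ x + y = s0 + s1 := by
      rcases pvPerm_pair_cases l' s0 s1 hl'p with rfl | rfl
      · exact ⟨s0, s1, hl's, rfl⟩
      · exact ⟨s1, s0, hl's, by omega⟩
    obtain ⟨x, y, hxys, hsum⟩ := hxy
    obtain ⟨is, hmap, hispw⟩ := List.sublist_eq_map_getElem hxys
    match is, hmap, hispw with
    | [p, q], hmap, hispw =>
      have hpq : (p : Nat) < (q : Nat) := by
        have := List.pairwise_cons.mp hispw
        exact this.1 q (by simp)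
      have hxv : t[(p : Nat)] = x := by simpa using congrArg (fun l => l.getD 0 0) hmap.symm
      have hyv : t[(q : Nat)] = y := by simpa using congrArg (fun l => l.getD 1 0) hmap.symm
      rw [pvMem_costs]
      refine ⟨((p : Nat) : Int) + 1, ((q : Nat) : Int) + 1, by omega, by omega, ?_, ?_⟩
      · have := q.isLt; simp only [List.length_cons]; omega
      · have h1 : PySem.List.pyGetD (a0 :: t) (((p : Nat) : Int) + 1) 0 = x := by
          have : (((p : Nat) : Int) + 1) = (((p : Nat) + 1 : Nat) : Int) := by push_cast; ring
          rw [this, PySem.List.pyGetD_natCast]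
          simpa [List.getD, p.isLt] using hxv
        have h2 : PySem.List.pyGetD (a0 :: t) (((q : Nat) : Int) + 1) 0 = y := by
          have : (((q : Nat) : Int) + 1) = (((q : Nat) + 1 : Nat) : Int) := by push_cast; ring
          rw [this, PySem.List.pyGetD_natCast]
          simpa [List.getD, q.isLt] using hyv
        rw [h1, h2, hsum]
  · -- s0 + s1 is a lower bound for every cost
    intro c hc
    rw [pvMem_costs] at hc
    obtain ⟨i, j, hi1, hij, hj, rfl⟩ := hc
    have hjlen : j < ((a0 :: t).length : Int) := hj
    have hilen : i < ((a0 :: t).length : Int) := by omega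
    rw [PySem.List.pyGetD_eq_getElem (a0 :: t) 0 (by omega) hilen,
        PySem.List.pyGetD_eq_getElem (a0 :: t) 0 (by omega) hjlen]
    have hilt : i.toNat - 1 < t.length := by simp at hilen; omega
    have hjlt : j.toNat - 1 < t.length := by simp at hjlen; omega
    have hiv : (a0 :: t)[i.toNat] = t[i.toNat - 1] := by
      simp [List.getElem_cons, show i.toNat ≠ 0 by omega]
    have hjv : (a0 :: t)[j.toNat] = t[j.toNat - 1] := by
      simp [List.getElem_cons, show j.toNat ≠ 0 by omega]
    rw [hiv, hjv]
    -- [t[i-1], t[j-1]] is a sublist of t, hence a subperm of the sorted list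
    have hsubt : [t[i.toNat - 1], t[j.toNat - 1]].Sublist t := by
      have := List.map_getElem_sublist (l := t)
        (is := [⟨i.toNat - 1, hilt⟩, ⟨j.toNat - 1, hjlt⟩]) (by simp; omega)
      simpa using this
    have hsp : [t[i.toNat - 1], t[j.toNat - 1]].Subperm (s0 :: s1 :: rest) :=
      hsubt.subperm.trans hperm.symm.subperm
    obtain ⟨l', hl'p, hl's⟩ := hsp
    rcases pvPerm_pair_cases l' (t[i.toNat - 1]) (t[j.toNat - 1]) hl'p with rfl | rfl
    · have := pvPair_sublist_bound s0 s1 rest hpw _ _ hl's; omega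
    · have := pvPair_sublist_bound s0 s1 rest hpw _ _ hl's; omega

-- ===== VERDICT (by name: the statement is the Claim_ definition above) =====
theorem division_of_array_spec : Claim_equal_division_of_array := by
  intro nums _
  unfold Spec_division_of_array division_of_array division_of_array_alt
  by_cases hn : (nums.length : Int) ≤ 3
  · simp [hn]
  · simp only [hn, if_false]
    have hlen : 4 ≤ nums.length := by omega
    match nums, hlen with
    | [], hlen => simp at hlen
    | a0 :: t, hlen =>
      have ht : 3 ≤ t.length := by simpa using hlen
      have hslen : (PySem.List.sorted t (fun x => x) false).length = t.length :=
        PySem.List.length_sorted ..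
      match hs : PySem.List.sorted t (fun x => x) false, hslen with
      | [], h => simp at h; omega
      | [_], h => simp at h; omega
      | s0 :: s1 :: rest, _ =>
        rw [pvLoop_eq_min?, pvMin_costs a0 t s0 s1 rest hs]
        rw [PySem.List.slice_from_one]
        show s0 + s1 + PySem.List.pyGetD (a0 :: t) 0 0 = _
        rw [show (a0 :: t).tail = t from rfl, hs]
        simp [PySem.List.pyGetD_zero_cons]
        have h1 : PySem.List.pyGetD (s0 :: s1 :: rest) 1 0 = s1 := by
          simpa using PySem.List.pyGetD_natCast (s0 :: s1 :: rest) 1 0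
        rw [h1]; ring
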